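-- pv_equiv track=rewrite | github.com/IstiN/trackstate | testing/tests/TS-671/test_ts_671.py | _extract_actions_section
-- ===== SOURCE A (Python) =====
-- def _extract_actions_section(help_output: str) -> str:
--     lines = help_output.splitlines()
--     capture = False
--     section_lines: list[str] = []
--     for line in lines:
--         if line.strip() == "Actions:":
--             capture = True
--             section_lines.append(line)
--             continue
--         if capture and line.strip() == "Examples:":
--             break
--         if capture:
--             section_lines.append(line)
--     return "\n".join(section_lines).strip()
-- ===== SOURCE B (Python) =====
-- def _extract_actions_section(help_output: str) -> str:
--     lines = help_output.splitlines()
--     strips = [line.strip() for line in lines]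
--     if "Actions:" not in strips:
--         return ""
--     i = strips.index("Actions:")
--     tail = strips[i + 1:]
--     j = i + 1 + tail.index("Examples:") if "Examples:" in tail else len(lines)
--     return "\n".join(lines[i:j]).strip()
-- ===== Notes on version B (the rewrite author's own statement) =====
-- stated objective: simpler
-- what changed: Replaces A's flag-driven single pass (capture boolean, accumulator, break) with locating the start and end boundary indices once and returning one slice join.
import Mathlib
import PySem

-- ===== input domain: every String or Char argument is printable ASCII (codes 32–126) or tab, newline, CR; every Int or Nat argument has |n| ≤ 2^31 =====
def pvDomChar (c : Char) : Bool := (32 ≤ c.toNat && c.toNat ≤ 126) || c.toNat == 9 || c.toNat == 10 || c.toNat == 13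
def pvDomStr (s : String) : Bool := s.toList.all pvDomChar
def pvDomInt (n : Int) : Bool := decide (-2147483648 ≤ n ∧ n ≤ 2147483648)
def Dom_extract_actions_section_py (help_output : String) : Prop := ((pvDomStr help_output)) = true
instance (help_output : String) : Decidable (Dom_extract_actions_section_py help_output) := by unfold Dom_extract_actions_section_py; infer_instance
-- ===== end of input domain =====

-- B locates the "Actions:"/"Examples:" boundary indices and joins one slice instead of A's capture-flag pass; objective: simpler.

-- ===== PORT A =====
-- the for-loop of A: state = (capture, section_lines); returning the accumulator models `break`
def pvLoopA : List String → Bool → List String → List String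
  | [], _, acc => acc
  | l :: ls, capture, acc =>
    if PySem.Str.strip l == "Actions:" then pvLoopA ls true (acc ++ [l])
    else if capture && (PySem.Str.strip l == "Examples:") then acc
    else if capture then pvLoopA ls capture (acc ++ [l])
    else pvLoopA ls capture acc

def extract_actions_section_py (help_output : String) : String :=
  let lines := PySem.Str.splitlines help_output
  PySem.Str.strip (PySem.Str.join "\n" (pvLoopA lines false []))

-- ===== PORT B =====
def extract_actions_section_py_alt (help_output : String) : String :=
  let lines := PySem.Str.splitlines help_output
  let strips := lines.map PySem.Str.strip
  match PySem.List.index? strips "Actions:" with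
  | none => ""
  | some i =>
    let tail := PySem.List.slice strips (some ((i + 1 : Nat) : Int)) none
    let j : Nat := match PySem.List.index? tail "Examples:" with
      | some k => i + 1 + k
      | none => lines.length
    PySem.Str.strip (PySem.Str.join "\n" (PySem.List.slice lines (some ((i : Nat) : Int)) (some ((j : Nat) : Int))))

-- ===== PRECONDITION & SPEC =====
def Spec_extract_actions_section_py (help_output : String) (out : String) : Prop := out = extract_actions_section_py_alt help_output
instance (help_output : String) (out : String) : Decidable (Spec_extract_actions_section_py help_output out) := by unfold Spec_extract_actions_section_py; infer_instance

-- ===== CLAIM (what is proved, stated in full; the proofs are below) =====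
def Claim_equal_extract_actions_section_py : Prop := ∀ (help_output : String), Dom_extract_actions_section_py help_output → Spec_extract_actions_section_py help_output (extract_actions_section_py help_output)

-- ===== LEMMAS AND PROOFS =====

-- common characterisation: the list of lines of the Actions: section
def pvExtract : List String → List String
  | [] => []
  | l :: t =>
    if PySem.Str.strip l == "Actions:" then
      l :: t.takeWhile (fun x => !(PySem.Str.strip x == "Examples:"))
    else pvExtract t

theorem pvLoopA_true (ls : List String) : ∀ acc,
    pvLoopA ls true acc = acc ++ ls.takeWhile (fun x => !(PySem.Str.strip x == "Examples:")) := by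
  induction ls with
  | nil => simp [pvLoopA]
  | cons l t ih =>
    intro acc
    by_cases hA : PySem.Str.strip l == "Actions:"
    · have hE : (PySem.Str.strip l == "Examples:") = false := by
        simp_all
      simp [pvLoopA, hA, ih, List.takeWhile, hE]
    · simp only [Bool.not_eq_true] at hA
      by_cases hE : PySem.Str.strip l == "Examples:"
      · simp [pvLoopA, hA, hE, List.takeWhile]
      · simp only [Bool.not_eq_true] at hE
        simp [pvLoopA, hA, hE, ih, List.takeWhile]

theorem pvLoopA_false (ls : List String) : ∀ acc,
    pvLoopA ls false acc = acc ++ pvExtract ls := by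
  induction ls with
  | nil => simp [pvLoopA, pvExtract]
  | cons l t ih =>
    intro acc
    by_cases hA : PySem.Str.strip l == "Actions:"
    · simp [pvLoopA, pvExtract, hA, pvLoopA_true]
    · simp only [Bool.not_eq_true] at hA
      simp [pvLoopA, pvExtract, hA, ih]

theorem pvExtract_eq_nil (ls : List String) (h : "Actions:" ∉ ls.map PySem.Str.strip) :
    pvExtract ls = [] := by
  induction ls with
  | nil => rfl
  | cons l t ih =>
    simp only [List.map_cons, List.mem_cons, not_or] at h
    have hb : (PySem.Str.strip l == "Actions:") = false :=
      beq_eq_false_iff_ne.mpr (fun hh => h.1 hh.symm)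
    simp [pvExtract, hb, ih h.2]

theorem pv_take_idx (t : List String) :
    t.takeWhile (fun x => !(PySem.Str.strip x == "Examples:")) =
    t.take (match PySem.List.index? (t.map PySem.Str.strip) "Examples:" with
            | some k => k | none => t.length) := by
  induction t with
  | nil => rfl
  | cons x t ih =>
    by_cases hE : PySem.Str.strip x = "Examples:"
    · rw [List.map_cons, hE, PySem.List.index?_cons_self]
      simp [List.takeWhile, hE]
    · rw [List.map_cons, PySem.List.index?_cons_of_ne _ (by simpa [eq_comm] using hE)]
      have hE' : (PySem.Str.strip x == "Examples:") = false := beq_eq_false_iff_ne.mpr hE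
      cases h : PySem.List.index? (t.map PySem.Str.strip) "Examples:" with
      | none =>
        rw [PySem.List.index?_eq_idxOf?] at h
        simp [List.takeWhile, hE', ih, h]
      | some k =>
        rw [PySem.List.index?_eq_idxOf?] at h
        simp [List.takeWhile, hE', ih, h]

-- B's slice, written with drop/take, equals pvExtract
theorem pvB_list (lines : List String) :
    (match PySem.List.index? (lines.map PySem.Str.strip) "Actions:" with
     | none => ([] : List String)
     | some i =>
       let tail := (lines.map PySem.Str.strip).drop (i + 1)
       let j : Nat := match PySem.List.index? tail "Examples:" with
         | some k => i + 1 + k | none => lines.length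
       (lines.drop i).take (j - i))
    = pvExtract lines := by
  induction lines with
  | nil => rfl
  | cons l t ih =>
    by_cases hA : PySem.Str.strip l = "Actions:"
    · rw [List.map_cons, hA, PySem.List.index?_cons_self]
      simp only [List.drop_succ_cons, List.drop_zero, Nat.sub_zero,
        pvExtract, hA, BEq.rfl, if_true]
      rw [pv_take_idx]
      cases h : PySem.List.index? (t.map PySem.Str.strip) "Examples:" with
      | none => simp
      | some k => simp [Nat.add_comm 1 k]
    · rw [List.map_cons, PySem.List.index?_cons_of_ne _ (by simpa [eq_comm] using hA)]
      have hA' : (PySem.Str.strip l == "Actions:") = false := by simpa using hA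
      cases h : PySem.List.index? (t.map PySem.Str.strip) "Actions:" with
      | none =>
        have : "Actions:" ∉ t.map PySem.Str.strip := by
          simpa [PySem.List.index?_eq_none_iff] using h
        simp [pvExtract, hA', pvExtract_eq_nil t this]
      | some i' =>
        have hR : pvExtract (l :: t) = pvExtract t := by simp [pvExtract, hA']
        rw [hR, ← ih, h]
        simp only [Option.map_some, List.drop_succ_cons]
        cases h2 : PySem.List.index? ((t.map PySem.Str.strip).drop (i' + 1)) "Examples:" with
        | none =>
          simp only [h2, List.length_cons]
          congr 1
          omega
        | some k =>
          simp only [h2]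
          congr 1
          omega

-- ===== VERDICT (by name: the statement is the Claim_ definition above) =====
theorem extract_actions_section_py_spec : Claim_equal_extract_actions_section_py := by
  intro h _
  unfold Spec_extract_actions_section_py extract_actions_section_py extract_actions_section_py_alt
  simp only
  rw [pvLoopA_false, List.nil_append]
  cases hI : PySem.List.index? ((PySem.Str.splitlines h).map PySem.Str.strip) "Actions:" with
  | none =>
    have hnm : "Actions:" ∉ (PySem.Str.splitlines h).map PySem.Str.strip := by
      simpa [PySem.List.index?_eq_none_iff] using hI
    rw [pvExtract_eq_nil _ hnm]
    rfl
  | some i =>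
    rw [← pvB_list (PySem.Str.splitlines h), hI]
    simp only [PySem.List.slice_from_natCast, PySem.List.slice_natCast]
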